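-- pv_equiv track=rewrite | github.com/MarkSon-42/Team_ALGO | jongwon/프로그래머스/lv2/62048. 멀쩡한 사각형/(1차 fail) 멀쩡한 사각형 copy.py | solution
-- ===== SOURCE A (Python) =====
-- def solution(w,h):
--     all_square = w * h
--     lst = [1, 2, 1]
--     minus = 0
--     cnt = 0
--     idx = 0
--     for i in range(h):
--         minus += lst[idx]
--         cnt += 1
--         idx += 1
--         if cnt == 3:
--             cnt = 0
--             idx = 0
--
--
--     result = all_square - minus
--     return result
-- ===== SOURCE B (Python) =====
-- def solution(w, h):
--     # closed form: the cycling [1,2,1] pattern sums to 4 per full period of 3 rows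
--     if h <= 0:
--         return w * h
--     q, r = divmod(h, 3)
--     return w * h - (4 * q + (0, 1, 3)[r])
-- ===== Notes on version B (the rewrite author's own statement) =====
-- stated objective: faster
-- what changed: Replaces the O(h) loop that accumulates the cycling [1,2,1] pattern with a closed form 4*(h//3) plus a 3-entry prefix table.
import Mathlib
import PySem

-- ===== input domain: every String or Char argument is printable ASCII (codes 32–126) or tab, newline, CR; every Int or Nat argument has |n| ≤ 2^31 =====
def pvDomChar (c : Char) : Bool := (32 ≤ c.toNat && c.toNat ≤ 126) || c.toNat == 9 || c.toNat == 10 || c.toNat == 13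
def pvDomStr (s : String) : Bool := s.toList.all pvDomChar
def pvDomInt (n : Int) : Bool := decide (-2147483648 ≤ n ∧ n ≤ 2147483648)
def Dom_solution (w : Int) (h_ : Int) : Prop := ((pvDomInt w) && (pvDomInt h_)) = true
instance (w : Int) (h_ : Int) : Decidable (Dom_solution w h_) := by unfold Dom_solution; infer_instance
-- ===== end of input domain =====

-- B replaces A's per-row loop over the cycling [1,2,1] pattern with an O(1) closed form.


-- ===== PORT A =====
-- A's loop body on the state (minus, cnt, idx); the range variable i is unused by A.
-- lst[idx]: idx is always 0, 1 or 2 in A's loop, so the IndexError branch of Python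
-- list indexing is unreachable; ported with pyGetD (exact on every reached state).
def pvStep (st : Int × Int × Int) : Int × Int × Int :=
  let minus := st.1
  let cnt := st.2.1
  let idx := st.2.2
  let minus := minus + PySem.List.pyGetD ([1, 2, 1] : List Int) idx 0
  let cnt := cnt + 1
  let idx := idx + 1
  if cnt == 3 then (minus, 0, 0) else (minus, cnt, idx)

def solution (w : Int) (h_ : Int) : Int :=
  let all_square := w * h_
  let st := (PySem.List.pyRange 0 h_ 1).foldl (fun st _ => pvStep st) (0, 0, 0)
  all_square - st.1

-- ===== PORT B =====
def solution_alt (w : Int) (h_ : Int) : Int :=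
  if h_ ≤ 0 then w * h_
  else
    let q := PySem.Int.floordiv h_ 3
    let r := PySem.Int.mod h_ 3
    w * h_ - (4 * q + PySem.List.pyGetD [0, 1, 3] r 0)

-- ===== PRECONDITION & SPEC =====
def Spec_solution (w : Int) (h_ : Int) (out : Int) : Prop := out = solution_alt w h_
instance (w : Int) (h_ : Int) (out : Int) : Decidable (Spec_solution w h_ out) := by unfold Spec_solution; infer_instance

-- ===== CLAIM (what is proved, stated in full; the proofs are below) =====
def Claim_equal_solution : Prop := ∀ (w : Int) (h_ : Int), Dom_solution w h_ → Spec_solution w h_ (solution w h_)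

-- ===== LEMMAS AND PROOFS =====

/-- the subtracted amount after n iterations of A's loop, in closed form -/
def pvMinus (n : Nat) : Int :=
  4 * (n / 3 : Nat) + (if n % 3 = 0 then 0 else if n % 3 = 1 then 1 else 3)

lemma pvFoldl_const {α : Type} (f : Int × Int × Int → Int × Int × Int)
    (l : List α) (init : Int × Int × Int) :
    l.foldl (fun st _ => f st) init = f^[l.length] init := by
  induction l generalizing init with
  | nil => rfl
  | cons a t ih => simp [List.foldl_cons, ih, Function.iterate_succ_apply]

lemma pvIter_eq (n : Nat) :
    pvStep^[n] (0, 0, 0) = (pvMinus n, ((n % 3 : Nat) : Int), ((n % 3 : Nat) : Int)) := by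
  induction n with
  | zero => simp [pvMinus]
  | succ n ih =>
    rw [Function.iterate_succ_apply', ih]
    have h3 : n % 3 = 0 ∨ n % 3 = 1 ∨ n % 3 = 2 := by omega
    rcases h3 with h | h | h
    · have e1 : (n + 1) % 3 = 1 := by omega
      have e2 : (n + 1) / 3 = n / 3 := by omega
      simp [pvStep, pvMinus, h, e1, e2, PySem.List.pyGetD]
    · have e1 : (n + 1) % 3 = 2 := by omega
      have e2 : (n + 1) / 3 = n / 3 := by omega
      simp [pvStep, pvMinus, h, e1, e2, PySem.List.pyGetD]
      omega
    · have e1 : (n + 1) % 3 = 0 := by omega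
      have e2 : (n + 1) / 3 = n / 3 + 1 := by omega
      simp [pvStep, pvMinus, h, e1, e2, PySem.List.pyGetD]
      ring

lemma pvSolution_eq (w h_ : Int) : solution w h_ = w * h_ - pvMinus h_.toNat := by
  unfold solution
  rw [pvFoldl_const, PySem.List.length_pyRange_one, pvIter_eq]
  simp

-- ===== VERDICT (by name: the statement is the Claim_ definition above) =====
theorem solution_spec : Claim_equal_solution := by
  intro w h_ _
  unfold Spec_solution
  rw [pvSolution_eq]
  unfold solution_alt
  split_ifs with hle
  · have : h_.toNat = 0 := by omega
    simp [this, pvMinus]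
  · obtain ⟨n, rfl⟩ : ∃ n : Nat, h_ = (n : Int) := ⟨h_.toNat, by omega⟩
    rw [PySem.Int.floordiv_eq_ediv_of_pos (by omega), PySem.Int.mod_eq_emod_of_pos (by omega)]
    have hdiv : ((n : Int)) / 3 = ((n / 3 : Nat) : Int) := (Int.natCast_div n 3).symm
    have hmod : ((n : Int)) % 3 = ((n % 3 : Nat) : Int) := (Int.natCast_mod n 3).symm
    have h3 : n % 3 = 0 ∨ n % 3 = 1 ∨ n % 3 = 2 := by omega
    rcases h3 with h | h | h <;>
      rw [hdiv, hmod, h] <;>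
      norm_num [pvMinus, h, PySem.List.pyGetD] <;>
      first | decide | ring
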